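-- pv_equiv track=rewrite | github.com/nullwiz/emlvm | rpn.py | gen_programs_up_to_k
-- ===== SOURCE A (Python) =====
-- from typing import Iterator
--
-- def gen_valid_rpn(num_ops: int, leaves: list[str]) -> Iterator[tuple[str, ...]]:
--     """
--     Generate all syntactically valid RPN programs with exactly `num_ops`
--     E-operators and (num_ops + 1) leaf tokens chosen from `leaves`.
--
--     Total count = Catalan(num_ops) × |leaves|^(num_ops+1).
--
--     Uses backtracking with pruning on stack-depth bounds.
--     """
--     n_leaves_total = num_ops + 1
--     buf: list[str] = []
--
--     def _gen(depth: int, ops_left: int, leaves_left: int) -> Iterator[tuple[str, ...]]: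
--         # Pruning: can we still land on depth=1?
--         min_final = depth - ops_left        # apply all remaining E's
--         max_final = depth + leaves_left     # push all remaining leaves
--         if not (min_final <= 1 <= max_final):
--             return
--
--         if ops_left == 0 and leaves_left == 0:
--             if depth == 1:
--                 yield tuple(buf)
--             return
--
--         # Push a leaf
--         if leaves_left > 0:
--             for leaf in leaves:
--                 buf.append(leaf)
--                 yield from _gen(depth + 1, ops_left, leaves_left - 1)
--                 buf.pop()
--
--         # Apply E (requires depth ≥ 2)
--         if ops_left > 0 and depth >= 2:
--             buf.append("E")
--             yield from _gen(depth - 1, ops_left - 1, leaves_left)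
--             buf.pop()
--
--     yield from _gen(0, num_ops, n_leaves_total)
--
-- def gen_programs_up_to_k(max_k: int, leaves: list[str]) -> Iterator[tuple[str, ...]]:
--     """
--     Yield all valid RPN programs with K ≤ max_k.
--     Valid K values are 1, 3, 5, ... (always odd for complete binary trees).
--     K=1 is a single leaf (trivial program).
--     """
--     # K=1: trivial, single leaf
--     for leaf in leaves:
--         yield (leaf,)
--     # K=3,5,7,...  ↔  num_ops = 1,2,3,...
--     k = 3
--     while k <= max_k:
--         num_ops = (k - 1) // 2
--         yield from gen_valid_rpn(num_ops, leaves)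
--         k += 2
-- ===== SOURCE B (Python) =====
-- def gen_programs_up_to_k(max_k, leaves):
--     """Iterative re-implementation: explicit stack of partial states instead of
--     recursive generators; same output order as the recursive DFS."""
--     # K=1: trivial, single leaf
--     for leaf in leaves:
--         yield (leaf,)
--     # K=3,5,7,...  <->  num_ops = 1,2,3,...
--     k = 3
--     while k <= max_k:
--         num_ops = (k - 1) // 2
--         stack = [(0, num_ops, num_ops + 1, ())]
--         while stack:
--             depth, ops_left, leaves_left, buf = stack.pop()
--             if not (depth - ops_left <= 1 <= depth + leaves_left):
--                 continue
--             if ops_left == 0 and leaves_left == 0: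
--                 if depth == 1:
--                     yield buf
--                 continue
--             children = []
--             if leaves_left > 0:
--                 for leaf in leaves:
--                     children.append((depth + 1, ops_left, leaves_left - 1, buf + (leaf,)))
--             if ops_left > 0 and depth >= 2:
--                 children.append((depth - 1, ops_left - 1, leaves_left, buf + ("E",)))
--             stack.extend(reversed(children))
--         k += 2
-- ===== Notes on version B (the rewrite author's own statement) =====
-- stated objective: alternative
-- what changed: The recursive backtracking generator _gen is replaced by an iterative DFS driven by an explicit stack of partial states (depth, ops_left, leaves_left, buf), pushing child states in reverse so the emission order is identical.
import Mathlib
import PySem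

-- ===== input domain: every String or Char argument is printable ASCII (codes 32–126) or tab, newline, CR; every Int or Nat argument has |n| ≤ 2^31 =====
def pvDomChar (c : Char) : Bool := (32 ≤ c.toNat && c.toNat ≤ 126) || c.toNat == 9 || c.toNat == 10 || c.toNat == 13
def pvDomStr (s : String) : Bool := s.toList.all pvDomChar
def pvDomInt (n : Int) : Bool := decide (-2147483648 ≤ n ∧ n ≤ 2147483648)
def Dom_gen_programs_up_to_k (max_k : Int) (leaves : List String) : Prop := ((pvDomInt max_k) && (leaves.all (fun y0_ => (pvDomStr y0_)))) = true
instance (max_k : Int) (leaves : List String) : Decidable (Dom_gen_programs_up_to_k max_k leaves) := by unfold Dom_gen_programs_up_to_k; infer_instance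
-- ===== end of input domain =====

-- B replaces A's recursive generator by an explicit-stack DFS over partial states
-- (alternative decomposition; same outputs in the same order).

-- ===== PORT A =====
-- A's `_gen`: the for-loop over `leaves` becomes the structural recursion `genALeaf`.
mutual
def genA (leaves : List String) (depth ops_left leaves_left : Int) (buf : List String) :
    List (List String) :=
  if ¬ (depth - ops_left ≤ 1 ∧ 1 ≤ depth + leaves_left) then []
  else if ops_left = 0 ∧ leaves_left = 0 then
    (if depth = 1 then [buf] else [])
  else
    (if 0 < leaves_left then genALeaf leaves leaves (depth + 1) ops_left (leaves_left - 1) buf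
     else []) ++
    (if 0 < ops_left ∧ 2 ≤ depth then
       genA leaves (depth - 1) (ops_left - 1) leaves_left (buf ++ ["E"])
     else [])
termination_by (ops_left.toNat + leaves_left.toNat, 0, 0)


def genALeaf (leaves pend : List String) (depth ops_left leaves_left : Int) (buf : List String) :
    List (List String) :=
  match pend with
  | [] => []
  | leaf :: tl =>
    genA leaves depth ops_left leaves_left (buf ++ [leaf]) ++
    genALeaf leaves tl depth ops_left leaves_left buf
termination_by (ops_left.toNat + leaves_left.toNat, 1, pend.length)

end

def gen_valid_rpn (num_ops : Int) (leaves : List String) : List (List String) :=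
  genA leaves 0 num_ops (num_ops + 1) []

def loopA (leaves : List String) (max_k k : Int) : List (List String) :=
  if k ≤ max_k then
    gen_valid_rpn (PySem.Int.floordiv (k - 1) 2) leaves ++ loopA leaves max_k (k + 2)
  else []
termination_by (max_k - k + 2).toNat
decreasing_by simp_wf; omega

def gen_programs_up_to_k (max_k : Int) (leaves : List String) : List (List String) :=
  leaves.map (fun leaf => [leaf]) ++ loopA leaves max_k 3

-- ===== PORT B =====
-- B's inner while-loop over the explicit stack of states (depth, ops_left, leaves_left, buf).
-- `pvWtSum` is cited by runB's termination proof (stack measure strictly decreases).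
theorem pvWtSum (B : Nat) (hB : 2 ≤ B) (cs : List (Int × Int × Int × List String)) (s : Nat)
    (hlen : cs.length + 1 ≤ B)
    (hmem : ∀ c ∈ cs, c.2.1.toNat + c.2.2.1.toNat + 1 ≤ s) :
    (cs.map (fun st => B ^ (st.2.1.toNat + st.2.2.1.toNat))).sum < B ^ s := by
  match cs, hlen, hmem with
  | [], _, _ => simpa using Nat.pow_pos (n := s) (show 0 < B by omega)
  | c :: tl, hlen, hmem =>
    have hs1 : 1 ≤ s := by have := hmem c (by simp); omega
    have hbound : ∀ cs' : List (Int × Int × Int × List String),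
        (∀ c ∈ cs', c.2.1.toNat + c.2.2.1.toNat + 1 ≤ s) →
        (cs'.map (fun st => B ^ (st.2.1.toNat + st.2.2.1.toNat))).sum ≤ cs'.length * B ^ (s - 1) := by
      intro cs' h
      induction cs' with
      | nil => simp
      | cons x xs ih =>
        simp only [List.map_cons, List.sum_cons, List.length_cons]
        have h1 : B ^ (x.2.1.toNat + x.2.2.1.toNat) ≤ B ^ (s - 1) :=
          Nat.pow_le_pow_right (by omega) (by have := h x (by simp); omega)
        have h2 := ih (fun c hc => h c (by simp [hc]))
        calc B ^ (x.2.1.toNat + x.2.2.1.toNat) + (xs.map (fun st => B ^ (st.2.1.toNat + st.2.2.1.toNat))).sum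
            ≤ B ^ (s - 1) + xs.length * B ^ (s - 1) := by omega
          _ = (xs.length + 1) * B ^ (s - 1) := by ring
    calc ((c :: tl).map (fun st => B ^ (st.2.1.toNat + st.2.2.1.toNat))).sum
        ≤ (c :: tl).length * B ^ (s - 1) := hbound _ hmem
      _ < B * B ^ (s - 1) := by
          apply Nat.mul_lt_mul_of_lt_of_le
          · simpa using hlen
          · exact le_rfl
          · exact Nat.pow_pos (by omega)
      _ = B ^ (s - 1 + 1) := by rw [Nat.pow_succ, Nat.mul_comm]
      _ = B ^ s := by congr 1; omega

def runB (leaves : List String) (stack : List (Int × Int × Int × List String)) :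
    List (List String) :=
  match stack with
  | [] => []
  | (depth, ops_left, leaves_left, buf) :: rest =>
    if ¬ (depth - ops_left ≤ 1 ∧ 1 ≤ depth + leaves_left) then runB leaves rest
    else if ops_left = 0 ∧ leaves_left = 0 then
      (if depth = 1 then [buf] else []) ++ runB leaves rest
    else
      runB leaves
        (((if 0 < leaves_left then
             leaves.map (fun leaf => (depth + 1, ops_left, leaves_left - 1, buf ++ [leaf]))
           else []) ++
          (if 0 < ops_left ∧ 2 ≤ depth then
             [(depth - 1, ops_left - 1, leaves_left, buf ++ ["E"])]
           else [])) ++ rest)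
termination_by
  (stack.map (fun st => (leaves.length + 2) ^ (st.2.1.toNat + st.2.2.1.toNat))).sum
decreasing_by
  · simp
  · simp
  · rw [List.map_append, List.sum_append]
    simp only [List.map_cons, List.sum_cons]
    refine Nat.add_lt_add_right (pvWtSum _ (by omega) _ _ ?_ ?_) _
    · split_ifs <;> simp
    · intro c hc
      rcases List.mem_append.mp hc with hc | hc
      · split_ifs at hc with h1
        · obtain ⟨x, -, rfl⟩ := List.mem_map.mp hc
          simp; omega
        · simp at hc
      · split_ifs at hc with h1
        · simp at hc; subst hc; simp; omega
        · simp at hc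


def loopB (leaves : List String) (max_k k : Int) : List (List String) :=
  if k ≤ max_k then
    (let num_ops := PySem.Int.floordiv (k - 1) 2
     runB leaves [(0, num_ops, num_ops + 1, [])]) ++ loopB leaves max_k (k + 2)
  else []
termination_by (max_k - k + 2).toNat
decreasing_by simp_wf; omega

def gen_programs_up_to_k_alt (max_k : Int) (leaves : List String) : List (List String) :=
  leaves.map (fun leaf => [leaf]) ++ loopB leaves max_k 3

-- ===== PRECONDITION & SPEC =====
def Spec_gen_programs_up_to_k (max_k : Int) (leaves : List String) (out : List (List String)) : Prop := out = gen_programs_up_to_k_alt max_k leaves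
instance (max_k : Int) (leaves : List String) (out : List (List String)) : Decidable (Spec_gen_programs_up_to_k max_k leaves out) := by unfold Spec_gen_programs_up_to_k; infer_instance

-- ===== CLAIM (what is proved, stated in full; the proofs are below) =====
def Claim_equal_gen_programs_up_to_k : Prop := ∀ (max_k : Int) (leaves : List String), Dom_gen_programs_up_to_k max_k leaves → Spec_gen_programs_up_to_k max_k leaves (gen_programs_up_to_k max_k leaves)

-- ===== LEMMAS AND PROOFS =====

theorem genALeaf_eq (leaves pend : List String) (d o l : Int) (buf : List String) :
    genALeaf leaves pend d o l buf
      = (pend.map (fun leaf => genA leaves d o l (buf ++ [leaf]))).flatten := by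
  induction pend with
  | nil => rw [genALeaf]; simp
  | cons hd tl ih => rw [genALeaf]; simp [ih]

-- DFS invariant: running the stack machine on `st :: rest` first emits everything the
-- recursive generator emits from `st`, then continues with `rest`.
theorem run_cons (leaves : List String) :
    ∀ (s : Nat) (d o l : Int) (buf : List String)
      (rest : List (Int × Int × Int × List String)),
      o.toNat + l.toNat ≤ s →
      runB leaves ((d, o, l, buf) :: rest) = genA leaves d o l buf ++ runB leaves rest := by
  intro s
  induction s with
  | zero =>
    intro d o l buf rest h
    have hl' : ¬(0 : Int) < l := by omega
    have ho' : ¬((0 : Int) < o ∧ 2 ≤ d) := by omega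
    rw [runB, genA]
    simp only [hl', ho', if_false]
    split_ifs <;> simp
  | succ s ih =>
    intro d o l buf rest h
    have chunk : ∀ (cs : List (Int × Int × Int × List String)) rest,
        (∀ c ∈ cs, c.2.1.toNat + c.2.2.1.toNat ≤ s) →
        runB leaves (cs ++ rest)
          = (cs.map (fun c => genA leaves c.1 c.2.1 c.2.2.1 c.2.2.2)).flatten
            ++ runB leaves rest := by
      intro cs
      induction cs with
      | nil => simp
      | cons c tl ihc =>
        intro rest hmem
        obtain ⟨d', o', l', buf'⟩ := c
        rw [List.cons_append, ih d' o' l' buf' (tl ++ rest) (hmem (d', o', l', buf') (by simp)),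
          ihc rest (fun c hc => hmem c (by simp [hc]))]
        simp
    rw [runB, genA]
    by_cases h1 : ¬(d - o ≤ 1 ∧ 1 ≤ d + l)
    · rw [if_pos h1, if_pos h1]; simp
    · rw [if_neg h1, if_neg h1]
      by_cases h2 : o = 0 ∧ l = 0
      · rw [if_pos h2, if_pos h2]
      · rw [if_neg h2, if_neg h2]
        by_cases hl : (0 : Int) < l <;> by_cases ho : ((0 : Int) < o ∧ 2 ≤ d)
        · rw [if_pos hl, if_pos hl, if_pos ho, if_pos ho,
            chunk _ rest (by
              intro c hc
              rcases List.mem_append.mp hc with hc | hc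
              · obtain ⟨x, -, rfl⟩ := List.mem_map.mp hc
                simp; omega
              · simp at hc; subst hc; simp; omega)]
          simp [List.map_map, Function.comp_def, genALeaf_eq]
        · rw [if_pos hl, if_pos hl, if_neg ho, if_neg ho,
            chunk _ rest (by
              intro c hc
              rcases List.mem_append.mp hc with hc | hc
              · obtain ⟨x, -, rfl⟩ := List.mem_map.mp hc
                simp; omega
              · simp at hc)]
          simp [List.map_map, Function.comp_def, genALeaf_eq]
        · rw [if_neg hl, if_neg hl, if_pos ho, if_pos ho,
            chunk _ rest (by
              intro c hc
              rcases List.mem_append.mp hc with hc | hc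
              · simp at hc
              · simp at hc; subst hc; simp; omega)]
          simp
        · rw [if_neg hl, if_neg hl, if_neg ho, if_neg ho]
          simp

theorem genA_eq_runB (leaves : List String) (d o l : Int) (buf : List String) :
    genA leaves d o l buf = runB leaves [(d, o, l, buf)] := by
  rw [run_cons leaves (o.toNat + l.toNat) d o l buf [] le_rfl, runB]
  simp

theorem loop_eq (leaves : List String) (max_k k : Int) :
    loopA leaves max_k k = loopB leaves max_k k := by
  fun_induction loopA leaves max_k k with
  | case1 k hk ih =>
    rw [loopB, if_pos hk, ih, gen_valid_rpn, genA_eq_runB]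
  | case2 k hk =>
    rw [loopB, if_neg hk]

-- ===== VERDICT (by name: the statement is the Claim_ definition above) =====
theorem gen_programs_up_to_k_spec : Claim_equal_gen_programs_up_to_k := by
  intro max_k leaves _
  unfold Spec_gen_programs_up_to_k gen_programs_up_to_k gen_programs_up_to_k_alt
  rw [loop_eq]
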